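-- pv_equiv track=rewrite | github.com/larrylzhao/ctci-solutions | my_stuff/bb/1_ladder.py | ladder_combinations
-- ===== SOURCE A (Python) =====
-- def ladder_combinations(n):
--     if n is 0:
--         return []
--
--     if n is 1:
--         return [[1]]
--
--     results = ladder_combinations(n-1)
--
--     additional_combos = []
--     for result in results:
--
--         if result[-1] is 1:
--             temp = result.copy()
--             temp[-1] = 2
--             additional_combos.append(temp)
--         result = result.append(1)
--
--     return results + additional_combos
-- ===== SOURCE B (Python) =====
-- def ladder_combinations(n):
--     if n == 0:
--         return []
--     results = [[1]]
--     for _ in range(2, n + 1):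
--         new_results = [r + [1] for r in results]
--         additional = [r[:-1] + [2] for r in results if r[-1] == 1]
--         results = new_results + additional
--     return results
-- ===== Notes on version B (the rewrite author's own statement) =====
-- stated objective: simpler
-- what changed: Replaced A's recursion with in-place row mutation by a bottom-up iterative loop that rebuilds the result list each round from two comprehensions (append-1 rows, then last-1-turned-2 rows), preserving A's exact order.
-- outside the precondition, e.g. on ladder_combinations(-6): A raises RecursionError, B returns [[1]]; on ladder_combinations(-8): A raises RecursionError, B returns [[1]]; on ladder_combinations(-10): A raises RecursionError, B returns [[1]]
import Mathlib
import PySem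

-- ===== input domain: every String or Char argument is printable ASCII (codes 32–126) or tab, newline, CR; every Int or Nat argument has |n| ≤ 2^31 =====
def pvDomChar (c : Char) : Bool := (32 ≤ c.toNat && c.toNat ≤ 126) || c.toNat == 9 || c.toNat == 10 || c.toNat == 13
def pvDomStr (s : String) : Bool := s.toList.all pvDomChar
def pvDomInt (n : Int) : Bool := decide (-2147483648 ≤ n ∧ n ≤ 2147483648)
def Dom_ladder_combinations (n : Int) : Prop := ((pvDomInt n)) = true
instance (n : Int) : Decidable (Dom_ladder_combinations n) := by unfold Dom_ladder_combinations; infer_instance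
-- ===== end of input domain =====

-- B replaces A's recursion (which mutates each row in place) by a bottom-up iterative
-- loop rebuilding the list from two comprehensions each round; same values, simpler shape.
-- (A mutates the rows of its recursive result in place; the equivalence is about the return value.)

-- ===== PORT A =====
-- A's recursion is on n-1; negative n never terminates in Python (RecursionError),
-- so the port recurses on n.toNat (faithful for all n ≥ 0, the only inputs Pre_ admits).
def ladderRecA : Nat → List (List Int)
  | 0 => []
  | 1 => [[1]]
  | m + 2 =>
    let results := ladderRecA (m + 1)
    -- the for-loop: builds additional_combos and appends 1 to each row of results
    let p := results.foldl
      (fun (acc : List (List Int) × List (List Int)) result =>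
        (acc.1 ++ [result ++ [1]],
         if PySem.List.pyGet? result (-1) = some (1 : Int) then
           acc.2 ++ [result.dropLast ++ [2]]    -- temp = copy; temp[-1] = 2
         else acc.2))
      ([], [])
    p.1 ++ p.2

def ladder_combinations (n : Int) : List (List Int) := ladderRecA n.toNat

-- ===== PORT B =====
def ladder_combinations_alt (n : Int) : List (List Int) :=
  if n = 0 then []
  else
    (PySem.List.pyRange 2 (n + 1) 1).foldl
      (fun results _ =>
        results.map (fun r => r ++ [1]) ++
        (results.filter (fun r => PySem.List.pyGet? r (-1) = some (1 : Int))).map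
          (fun r => r.dropLast ++ [2]))
      [[1]]

-- ===== PRECONDITION & SPEC =====
-- Pre_ excludes n < 0, on which the Python A raises RecursionError (it never returns).
def Pre_ladder_combinations (n : Int) : Prop := 0 ≤ n
instance (n : Int) : Decidable (Pre_ladder_combinations n) := by unfold Pre_ladder_combinations; infer_instance
def pvWitness_ladder_combinations : Int := (4)

def Spec_ladder_combinations (n : Int) (out : List (List Int)) : Prop := out = ladder_combinations_alt n
instance (n : Int) (out : List (List Int)) : Decidable (Spec_ladder_combinations n out) := by unfold Spec_ladder_combinations; infer_instance

-- ===== CLAIM (what is proved, stated in full; the proofs are below) =====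
def Claim_equal_ladder_combinations : Prop := ∀ (n : Int), Dom_ladder_combinations n → Pre_ladder_combinations n → Spec_ladder_combinations n (ladder_combinations n)

-- ===== LEMMAS AND PROOFS =====

-- one round: what B's loop body computes from a result list
def ladderStep (S : List (List Int)) : List (List Int) :=
  S.map (fun r => r ++ [1]) ++
  (S.filter (fun r => PySem.List.pyGet? r (-1) = some (1 : Int))).map
    (fun r => r.dropLast ++ [2])

-- A's for-loop accumulates exactly the two comprehensions
theorem foldA_eq (rs : List (List Int)) (a b : List (List Int)) :
    rs.foldl
      (fun (acc : List (List Int) × List (List Int)) result =>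
        (acc.1 ++ [result ++ [1]],
         if PySem.List.pyGet? result (-1) = some (1 : Int) then
           acc.2 ++ [result.dropLast ++ [2]]
         else acc.2))
      (a, b)
    = (a ++ rs.map (fun r => r ++ [1]),
       b ++ (rs.filter (fun r => PySem.List.pyGet? r (-1) = some (1 : Int))).map
          (fun r => r.dropLast ++ [2])) := by
  induction rs generalizing a b with
  | nil => simp
  | cons r rs ih =>
    simp only [List.foldl_cons, ih, List.map_cons, List.filter_cons]
    by_cases h : PySem.List.pyGet? r (-1) = some (1 : Int) <;> simp [h]

theorem ladderRecA_succ_succ (m : Nat) :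
    ladderRecA (m + 2) = ladderStep (ladderRecA (m + 1)) := by
  rw [ladderRecA, foldA_eq]
  simp [ladderStep]

theorem ladderRecA_iterate (m : Nat) :
    ladderRecA (m + 1) = ladderStep^[m] [[1]] := by
  induction m with
  | zero => rfl
  | succ k ih =>
    rw [show k + 1 + 1 = k + 2 from rfl, ladderRecA_succ_succ, ih,
      Function.iterate_succ_apply']

-- a fold that ignores its elements is an iterate
theorem foldl_const_iterate (l : List Int) (init : List (List Int)) :
    l.foldl (fun S _ => ladderStep S) init = ladderStep^[l.length] init := by
  induction l generalizing init with
  | nil => rfl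
  | cons x xs ih => simp [List.foldl_cons, ih, Function.iterate_succ_apply]

theorem alt_eq_iterate (n : Int) (h : 0 < n) :
    ladder_combinations_alt n = ladderStep^[(n - 1).toNat] [[1]] := by
  unfold ladder_combinations_alt
  rw [if_neg (by omega)]
  have : (fun (results : List (List Int)) (_ : Int) =>
      results.map (fun r => r ++ [1]) ++
      (results.filter (fun r => PySem.List.pyGet? r (-1) = some (1 : Int))).map
        (fun r => r.dropLast ++ [2])) = fun S _ => ladderStep S := by
    funext S x; rfl
  rw [this, foldl_const_iterate, PySem.List.length_pyRange_one]
  congr 1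
  omega

-- ===== VERDICT (by name: the statement is the Claim_ definition above) =====
theorem ladder_combinations_spec : Claim_equal_ladder_combinations := by
  intro n _ hpre
  unfold Spec_ladder_combinations ladder_combinations
  rcases eq_or_lt_of_le hpre with h0 | hpos
  · simp [← h0, ladderRecA, ladder_combinations_alt]
  · rw [alt_eq_iterate n hpos]
    have hn : n.toNat = (n - 1).toNat + 1 := by omega
    rw [hn, ladderRecA_iterate]
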